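-- pv_equiv track=rewrite | github.com/bilickiv/milabwp4 | aktigraf_old/zcm/zcm_helper.py | _switchlist_smoother
-- ===== SOURCE A (Python) =====
-- import copy
--
-- def _get_switchlist(data, threshold=1):
--
--     """
--     switchlist([number_value, length, last_index][][])
--     for example  if the original list looks like [n,n,n,n,n,n,n,n,k,k,k,k,k,m,m,m,m,........] then
--     switchlist[(1, 8, 7,),(0, 5, 12),.....], where if threshold == 5, then k < 5 and m >= 5 and n >= 5
--     """
--     data_copy = copy.deepcopy(data)
--     switch_list = []
--     _length = 0
--     LOWER = data_copy[0] < threshold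
--     _number = 0 if LOWER else 1
--     for idx, value in enumerate(data_copy):
--         if (value < threshold) == LOWER:
--             _length += 1
--         else:
--             if _length == 0:
--                 _length = 1
--             switch_list.append((_number, _length, idx - 1))
--             _number = 0 if value < threshold else 1
--             _length = 1
--             LOWER = not LOWER
--         if idx == len(data) - 1:
--             switch_list.append((_number, _length, idx))
--     return switch_list
--
-- def _construct_list_from_switchlist(switchlist):
--     """
--     constructs a characteristic list from the switchlist
--
--     for example:
--     switchlist = [(0,3,2),(1,3,5)]
--     it returns [0,0,0,1,1,1]
--
--     :param switchlist: given switchlist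
--     :return: list of values
--     """
--     return_list = []
--     for u_val in switchlist:
--         for i in range(u_val[1]):
--             return_list.append(u_val[0])
--     return return_list
--
-- def _switchlist_smoother(switchlist, threshold=10, target=0, left_window=20, right_window=20):
--     """
--     :param switchlist: given switchlist
--     :param threshold: maximum length to smooth
--     :param target: value to smooth
--     :param left_window: minimum length for the target section at the left side
--     :param right_window: minimum length for the target section at the right side
--     :return: smoothed switchlist
--
--     if a non-target section has at least left_window-length target section to the left and
--     right_window-length target section to the right, the non-target section becomes target section
--
--     """
--     switchlist_copy = copy.deepcopy(switchlist)
--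
--     for idx, u_val in enumerate(switchlist):
--         if 0 < idx < len(switchlist) - 1:
--             if u_val[0] != target and u_val[1] < threshold and switchlist[idx-1][1] >= left_window and switchlist[idx+1][1] >= right_window:
--                 switchlist_copy[idx] = (target, u_val[1], u_val[2])
--
--     constr_list = _construct_list_from_switchlist(switchlist_copy)
--     return_switchlist = _get_switchlist(constr_list, threshold=1)
--
--     return return_switchlist
-- ===== SOURCE B (Python) =====
-- def _switchlist_smoother(switchlist, threshold=10, target=0, left_window=20, right_window=20):
--     """Smooth and re-compress directly on the segments: merge adjacent same-class
--     segments and recompute the end indices with a cumulative sum, without expanding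
--     the segments to the element level."""
--     n = len(switchlist)
--     runs = []  # merged runs as [class, length]; class is 0 (value < 1) or 1
--     for idx, u_val in enumerate(switchlist):
--         number, length = u_val[0], u_val[1]
--         if 0 < idx < n - 1:
--             if number != target and length < threshold \
--                     and switchlist[idx - 1][1] >= left_window \
--                     and switchlist[idx + 1][1] >= right_window:
--                 number = target
--         if length <= 0:
--             continue  # such a segment expands to nothing
--         cls = 0 if number < 1 else 1
--         if runs and runs[-1][0] == cls:
--             runs[-1][1] += length
--         else:
--             runs.append([cls, length])
--     out = []
--     pos = 0
--     for cls, length in runs: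
--         pos += length
--         out.append((cls, length, pos - 1))
--     return out
-- ===== Notes on version B (the rewrite author's own statement) =====
-- stated objective: alternative
-- what changed: B merges adjacent same-class segments directly on the switchlist in one pass and recomputes the end indices by a cumulative sum, instead of expanding every segment into a list of its full length and re-running the element-by-element run-length scan over the expansion.
-- crash fix: On inputs where every segment length is < 1 (including the empty switchlist) the reconstructed characteristic list is empty and A raises IndexError in _get_switchlist (data[0]); B returns []. — e.g. on _switchlist_smoother([], 10, 0, 20, 20): A raises IndexError, B returns []
import Mathlib
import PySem

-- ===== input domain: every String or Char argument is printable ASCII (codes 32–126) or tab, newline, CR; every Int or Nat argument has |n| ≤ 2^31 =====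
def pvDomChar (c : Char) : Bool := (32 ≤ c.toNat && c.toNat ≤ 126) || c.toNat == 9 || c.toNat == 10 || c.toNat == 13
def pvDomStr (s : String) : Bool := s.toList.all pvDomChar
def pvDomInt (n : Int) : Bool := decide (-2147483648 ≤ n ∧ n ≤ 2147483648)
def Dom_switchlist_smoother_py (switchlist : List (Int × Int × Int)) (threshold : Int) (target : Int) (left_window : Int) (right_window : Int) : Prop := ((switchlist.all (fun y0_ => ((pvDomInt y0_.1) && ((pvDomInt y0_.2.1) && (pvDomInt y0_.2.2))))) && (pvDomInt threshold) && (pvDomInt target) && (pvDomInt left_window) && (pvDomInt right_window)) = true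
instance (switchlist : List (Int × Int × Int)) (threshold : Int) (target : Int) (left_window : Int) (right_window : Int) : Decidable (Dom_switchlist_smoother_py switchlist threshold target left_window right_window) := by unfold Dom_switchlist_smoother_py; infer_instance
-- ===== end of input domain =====

-- B re-compresses the switchlist directly on the segments (merge adjacent equal
-- classes, then one cumulative pass for the indices) instead of expanding every
-- segment to a list of its full length and re-scanning it element by element.

-- ===== PORT A =====

-- the smoothing condition of A's loop body ('if 0 < idx < len-1: if u[0] != target and …');
-- it is the identical sub-expression in both Python sources, so it is shared.
-- The getD default (0,0,0) is never read: the guard 0 < idx < len-1 puts idx±1 in range.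
def smoothCond (sl : List (Int × Int × Int)) (thr tgt lw rw : Int) (idx : Nat) (u : Int × Int × Int) : Bool :=
  decide (0 < idx) && decide (idx < sl.length - 1) &&
  (decide (u.1 ≠ tgt) && decide (u.2.1 < thr) &&
   decide (lw ≤ (sl.getD (idx - 1) (0, 0, 0)).2.1) && decide (rw ≤ (sl.getD (idx + 1) (0, 0, 0)).2.1))

-- _construct_list_from_switchlist: 'for i in range(u[1]): out.append(u[0])'
-- = append u[1] copies (none when u[1] ≤ 0, exactly range's behaviour).
def constructListFromSwitchlist (sl : List (Int × Int × Int)) : List Int :=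
  sl.foldl (fun acc u => acc ++ List.replicate u.2.1.toNat u.1) []

-- the for-loop of _get_switchlist: state (switch_list, _number, _length, LOWER), idx the loop counter
def gsLoop (thr : Int) (total : Nat) (idx : Nat) (sl : List (Int × Int × Int))
    (num len : Int) (low : Bool) : List Int → List (Int × Int × Int)
  | [] => sl
  | v :: rest =>
    if decide (v < thr) == low then
      let len' := len + 1
      let sl' := if idx = total - 1 then sl ++ [(num, len', (idx : Int))] else sl
      gsLoop thr total (idx + 1) sl' num len' low rest
    else
      let len0 : Int := if len == 0 then 1 else len
      let sl1 := sl ++ [(num, len0, (idx : Int) - 1)]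
      let num' : Int := if v < thr then 0 else 1
      let sl' := if idx = total - 1 then sl1 ++ [(num', 1, (idx : Int))] else sl1
      gsLoop thr total (idx + 1) sl' num' 1 (!low) rest

-- _get_switchlist; on [] Python raises IndexError (data[0]): excluded by Pre_
def getSwitchlist (data : List Int) (thr : Int) : List (Int × Int × Int) :=
  match data with
  | [] => []
  | d0 :: _ =>
    let low := decide (d0 < thr)
    gsLoop thr data.length 0 [] (if low then 0 else 1) 0 low data

def switchlist_smoother_py (switchlist : List (Int × Int × Int)) (threshold : Int) (target : Int) (left_window : Int) (right_window : Int) : List (Int × Int × Int) :=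
  -- 'switchlist_copy[idx] = (target, u[1], u[2])' rebuilt elementwise (each index is written at most once)
  let copy := switchlist.mapIdx (fun idx u =>
    if smoothCond switchlist threshold target left_window right_window idx u
    then (target, u.2.1, u.2.2) else u)
  getSwitchlist (constructListFromSwitchlist copy) 1

-- ===== PORT B =====

-- one step of B's single merging pass; runs is held in REVERSE order (Python's
-- runs[-1] is the head here)
def mergeStep (sl : List (Int × Int × Int)) (thr tgt lw rw : Int)
    (runs : List (Int × Int)) (p : (Int × Int × Int) × Nat) : List (Int × Int) :=
  let num := if smoothCond sl thr tgt lw rw p.2 p.1 then tgt else p.1.1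
  let len := p.1.2.1
  if len ≤ 0 then runs
  else
    let c : Int := if num < 1 then 0 else 1
    match runs with
    | (c', m) :: rest => if c' == c then (c', m + len) :: rest else (c, len) :: (c', m) :: rest
    | [] => [(c, len)]

def switchlist_smoother_py_alt (switchlist : List (Int × Int × Int)) (threshold : Int) (target : Int) (left_window : Int) (right_window : Int) : List (Int × Int × Int) :=
  let revRuns := switchlist.zipIdx.foldl (mergeStep switchlist threshold target left_window right_window) []
  (revRuns.reverse.foldl (fun (acc : List (Int × Int × Int) × Int) r =>
      (acc.1 ++ [(r.1, r.2, acc.2 + r.2 - 1)], acc.2 + r.2)) ([], 0)).1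

-- ===== PRECONDITION & SPEC =====

-- A raises IndexError when the reconstructed characteristic list is empty, i.e. when
-- every segment length is < 1 (in particular on the empty switchlist); Pre_ excludes exactly those inputs.
def Pre_switchlist_smoother_py (switchlist : List (Int × Int × Int)) (threshold : Int) (target : Int) (left_window : Int) (right_window : Int) : Prop :=
  ∃ u ∈ switchlist, 1 ≤ u.2.1
instance (switchlist : List (Int × Int × Int)) (threshold : Int) (target : Int) (left_window : Int) (right_window : Int) : Decidable (Pre_switchlist_smoother_py switchlist threshold target left_window right_window) := by unfold Pre_switchlist_smoother_py; infer_instance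

def pvWitness_switchlist_smoother_py : (List (Int × Int × Int)) × Int × Int × Int × Int :=
  ([(1, 5, 4), (0, 3, 7)], 10, 0, 20, 20)

-- On inputs whose every segment length is < 1 (including the empty switchlist) A raises
-- IndexError (the reconstructed list is empty and _get_switchlist reads data[0]); B returns [].
def Raises_switchlist_smoother_py (switchlist : List (Int × Int × Int)) (threshold : Int) (target : Int) (left_window : Int) (right_window : Int) : Prop :=
  ∀ u ∈ switchlist, u.2.1 < 1
instance (switchlist : List (Int × Int × Int)) (threshold : Int) (target : Int) (left_window : Int) (right_window : Int) : Decidable (Raises_switchlist_smoother_py switchlist threshold target left_window right_window) := by unfold Raises_switchlist_smoother_py; infer_instance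

def pvRaiseWitness_switchlist_smoother_py : (List (Int × Int × Int)) × Int × Int × Int × Int :=
  ([], 10, 0, 20, 20)
def pvRaiseWitnessOut_switchlist_smoother_py : List (Int × Int × Int) := []

def Spec_switchlist_smoother_py (switchlist : List (Int × Int × Int)) (threshold : Int) (target : Int) (left_window : Int) (right_window : Int) (out : List (Int × Int × Int)) : Prop := out = switchlist_smoother_py_alt switchlist threshold target left_window right_window
instance (switchlist : List (Int × Int × Int)) (threshold : Int) (target : Int) (left_window : Int) (right_window : Int) (out : List (Int × Int × Int)) : Decidable (Spec_switchlist_smoother_py switchlist threshold target left_window right_window out) := by unfold Spec_switchlist_smoother_py; infer_instance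

-- ===== CLAIM (what is proved, stated in full; the proofs are below) =====
def Claim_equal_switchlist_smoother_py : Prop := ∀ (switchlist : List (Int × Int × Int)) (threshold : Int) (target : Int) (left_window : Int) (right_window : Int), Dom_switchlist_smoother_py switchlist threshold target left_window right_window → Pre_switchlist_smoother_py switchlist threshold target left_window right_window → Spec_switchlist_smoother_py switchlist threshold target left_window right_window (switchlist_smoother_py switchlist threshold target left_window right_window)
def Claim_raises_switchlist_smoother_py : Prop := (∀ (switchlist : List (Int × Int × Int)) (threshold : Int) (target : Int) (left_window : Int) (right_window : Int), Dom_switchlist_smoother_py switchlist threshold target left_window right_window → Raises_switchlist_smoother_py switchlist threshold target left_window right_window → ¬ Pre_switchlist_smoother_py switchlist threshold target left_window right_window) ∧ (Dom_switchlist_smoother_py (pvRaiseWitness_switchlist_smoother_py.1) (pvRaiseWitness_switchlist_smoother_py.2.1) (pvRaiseWitness_switchlist_smoother_py.2.2.1) (pvRaiseWitness_switchlist_smoother_py.2.2.2.1) (pvRaiseWitness_switchlist_smoother_py.2.2.2.2) ∧ Raises_switchlist_smoother_py (pvRaiseWitness_switchlist_smoother_py.1) (pvRaiseWitness_switchlist_smoother_py.2.1)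 (pvRaiseWitness_switchlist_smoother_py.2.2.1) (pvRaiseWitness_switchlist_smoother_py.2.2.2.1) (pvRaiseWitness_switchlist_smoother_py.2.2.2.2) ∧ switchlist_smoother_py_alt (pvRaiseWitness_switchlist_smoother_py.1) (pvRaiseWitness_switchlist_smoother_py.2.1) (pvRaiseWitness_switchlist_smoother_py.2.2.1) (pvRaiseWitness_switchlist_smoother_py.2.2.2.1) (pvRaiseWitness_switchlist_smoother_py.2.2.2.2) = pvRaiseWitnessOut_switchlist_smoother_py)

-- ===== LEMMAS AND PROOFS =====

-- the class of a value under threshold 1 (Python's LOWER)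
def clsB (v : Int) : Bool := decide (v < 1)

-- run-length encoding spec: runsAux pending (b,k), then decorate with numbers and end indices
def runsAux (b : Bool) (k : Nat) : List Bool → List (Bool × Nat)
  | [] => [(b, k)]
  | x :: xs => if x = b then runsAux b (k + 1) xs else (b, k) :: runsAux x 1 xs

def decFrom (p : Int) : List (Bool × Nat) → List (Int × Int × Int)
  | [] => []
  | (b, k) :: rs => ((if b then (0 : Int) else 1), (k : Int), p + k - 1) :: decFrom (p + k) rs

def runsTop (thr : Int) : List Int → List (Int × Int × Int)
  | [] => []
  | d0 :: rest => decFrom 0 (runsAux (decide (d0 < thr)) 1 (rest.map (fun v => decide (v < thr))))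

-- segment-level merging spec
def mrgAux (b : Bool) (k : Nat) : List (Bool × Nat) → List (Bool × Nat)
  | [] => [(b, k)]
  | (c, m) :: rest => if c = b then mrgAux b (k + m) rest else (b, k) :: mrgAux c m rest

def mrgTop : List (Bool × Nat) → List (Bool × Nat)
  | [] => []
  | (b, k) :: rest => mrgAux b k rest

-- normalized segments: drop non-positive lengths, keep (class, length)
def normSegs (ps : List (Int × Int)) : List (Bool × Nat) :=
  ps.filterMap (fun q => if q.2 ≤ 0 then none else some (clsB q.1, q.2.toNat))

def expandB (ns : List (Bool × Nat)) : List Bool :=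
  ns.flatMap (fun s => List.replicate s.2 s.1)

theorem gsLoop_spec (thr : Int) (total : Nat) :
    ∀ (rest : List Int) (idx k : Nat) (sl : List (Int × Int × Int)) (low : Bool),
      rest ≠ [] → idx + rest.length = total → 1 ≤ k →
      gsLoop thr total idx sl (if low then 0 else 1) (k : Int) low rest
        = sl ++ decFrom ((idx : Int) - k) (runsAux low k (rest.map (fun v => decide (v < thr)))) := by
  intro rest
  induction rest with
  | nil => intro _ _ _ _ h; exact absurd rfl h
  | cons v rest' IH =>
    intro idx k sl low _ htot hk
    by_cases hv : decide (v < thr) = low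
    · by_cases h' : rest' = []
      · subst h'
        have hidx : idx = total - 1 := by simp at htot; omega
        simp only [gsLoop, hv, beq_self_eq_true, if_true, if_pos hidx, List.map_cons,
          List.map_nil, runsAux, decFrom]
        push_cast
        ring_nf
      · have hidx : idx ≠ total - 1 := by
          have := List.length_pos_iff.mpr h'
          simp [List.length_cons] at htot; omega
        have hcast : (k : Int) + 1 = ((k + 1 : Nat) : Int) := by push_cast; ring
        simp only [gsLoop, hv, beq_self_eq_true, if_true, if_neg hidx]
        rw [hcast, IH (idx + 1) (k + 1) sl low h' (by simp at htot ⊢; omega) (by omega)]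
        simp only [List.map_cons, runsAux, hv]
        congr 2
        push_cast; ring
    · have hx : decide (v < thr) = !low := by
        cases h : decide (v < thr) <;> cases hl : low <;> simp_all
      have hk0 : ((k : Int) == 0) = false := by
        simp only [beq_eq_false_iff_ne, ne_eq, Int.natCast_eq_zero]; omega
      have hnum : (if v < thr then (0 : Int) else 1) = (if !low then (0 : Int) else 1) := by
        have : (v < thr) ↔ ((!low) = true) := by rw [← hx]; simp
        simp [this]
      by_cases h' : rest' = []
      · subst h'
        have hidx : idx = total - 1 := by simp at htot; omega
        simp only [gsLoop, hx, Bool.not_beq_self, if_false, Bool.false_eq_true, hk0, hnum,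
          if_pos hidx, List.map_cons, List.map_nil, runsAux, Bool.not_eq_self, decFrom]
        simp only [List.append_assoc, List.cons_append, List.nil_append]
        push_cast
        ring_nf
      · have hidx : idx ≠ total - 1 := by
          have := List.length_pos_iff.mpr h'
          simp [List.length_cons] at htot; omega
        simp only [gsLoop, hx, Bool.not_beq_self, if_false, Bool.false_eq_true, hk0,
          if_neg hidx]
        rw [hnum]
        refine (IH (idx + 1) 1 _ (!low) h' (by simp at htot ⊢; omega) le_rfl).trans ?_
        simp only [List.map_cons, runsAux, hx, Bool.not_eq_self, if_false, decFrom]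
        push_cast
        ring_nf
        simp [List.append_assoc]

theorem getSwitchlist_eq_runsTop (data : List Int) (thr : Int) (h : data ≠ []) :
    getSwitchlist data thr = runsTop thr data := by
  cases data with
  | nil => exact absurd rfl h
  | cons d0 rest =>
    cases rest with
    | nil => simp [getSwitchlist, gsLoop, runsAux, runsTop, decFrom]
    | cons r rest' =>
      have h0 : (0 : Nat) ≠ (d0 :: r :: rest').length - 1 := by
        simp only [List.length_cons]; omega
      simp only [getSwitchlist, runsTop, gsLoop, beq_self_eq_true, if_true, if_neg h0]
      refine (gsLoop_spec thr _ (r :: rest') 1 1 [] (decide (d0 < thr)) (by simp)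
        (by simp only [List.length_cons]; omega) le_rfl).trans ?_
      norm_num

def stepN (runs : List (Bool × Nat)) (s : Bool × Nat) : List (Bool × Nat) :=
  match runs with
  | (c', m) :: rest => if c' = s.1 then (c', m + s.2) :: rest else s :: (c', m) :: rest
  | [] => [s]

def convRun (s : Bool × Nat) : Int × Int := ((if s.1 then 0 else 1), (s.2 : Int))

def runsB : List Bool → List (Int × Int × Int)
  | [] => []
  | x :: xs => decFrom 0 (runsAux x 1 xs)

theorem expandB_cons (b : Bool) (k : Nat) (rest : List (Bool × Nat)) :
    expandB ((b, k) :: rest) = List.replicate k b ++ expandB rest := rfl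

theorem normSegs_cons (q : Int × Int) (ps : List (Int × Int)) :
    normSegs (q :: ps) = if q.2 ≤ 0 then normSegs ps
      else (clsB q.1, q.2.toNat) :: normSegs ps := by
  by_cases hq : q.2 ≤ 0 <;> simp [normSegs, hq]

theorem runsAux_replicate_same (b : Bool) (m : Nat) : ∀ (k : Nat) (xs : List Bool),
    runsAux b k (List.replicate m b ++ xs) = runsAux b (k + m) xs := by
  induction m with
  | zero => intro k xs; simp [List.replicate]
  | succ m IH =>
    intro k xs
    rw [List.replicate_succ, List.cons_append, runsAux, if_pos rfl, IH,
      Nat.add_assoc, Nat.add_comm 1 m]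

theorem runsAux_replicate_ne (b c : Bool) (h : c ≠ b) (k m : Nat) (hm : 1 ≤ m)
    (xs : List Bool) :
    runsAux b k (List.replicate m c ++ xs) = (b, k) :: runsAux c m xs := by
  cases m with
  | zero => omega
  | succ m =>
    simp only [List.replicate, List.cons_append, runsAux, if_neg h, runsAux_replicate_same]
    rw [Nat.add_comm 1 m]

theorem runsAux_expandB : ∀ (ns : List (Bool × Nat)), (∀ s ∈ ns, 1 ≤ s.2) →
    ∀ (b : Bool) (k : Nat), runsAux b k (expandB ns) = mrgAux b k ns := by
  intro ns
  induction ns with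
  | nil => intro _ b k; simp [expandB, runsAux, mrgAux]
  | cons s rest IH =>
    intro hall b k
    obtain ⟨c, m⟩ := s
    have hm : 1 ≤ m := hall (c, m) (by simp)
    have hrest : ∀ s ∈ rest, 1 ≤ s.2 := fun s hs => hall s (by simp [hs])
    by_cases hc : c = b
    · subst hc
      rw [expandB_cons, runsAux_replicate_same, IH hrest _ (k + m)]
      simp [mrgAux]
    · rw [expandB_cons, runsAux_replicate_ne b c hc k m hm, IH hrest c m]
      simp [mrgAux, hc]

theorem runsB_expandB (ns : List (Bool × Nat)) (hall : ∀ s ∈ ns, 1 ≤ s.2) :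
    runsB (expandB ns) = decFrom 0 (mrgTop ns) := by
  cases ns with
  | nil => simp [expandB, runsB, mrgTop, decFrom]
  | cons s rest =>
    obtain ⟨b, k⟩ := s
    have hk : 1 ≤ k := hall (b, k) (by simp)
    have hrest : ∀ s ∈ rest, 1 ≤ s.2 := fun s hs => hall s (by simp [hs])
    cases k with
    | zero => omega
    | succ k =>
      rw [expandB_cons]
      simp only [List.replicate, List.cons_append, runsB, mrgTop]
      rw [runsAux_replicate_same, runsAux_expandB rest hrest, Nat.add_comm 1 k]

theorem map_cls_flatMap (ps : List (Int × Int)) :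
    (ps.flatMap (fun q => List.replicate q.2.toNat q.1)).map clsB = expandB (normSegs ps) := by
  induction ps with
  | nil => simp [expandB, normSegs]
  | cons q rest IH =>
    rw [List.flatMap_cons, List.map_append, List.map_replicate, normSegs_cons]
    by_cases hq : q.2 ≤ 0
    · have h0 : q.2.toNat = 0 := by omega
      simp [hq, h0, IH]
    · simp only [if_neg hq, expandB_cons, IH]

theorem foldl_stepN_mrgAux : ∀ (ns : List (Bool × Nat)) (b : Bool) (k : Nat)
    (tailRev : List (Bool × Nat)),
    ns.foldl stepN ((b, k) :: tailRev) = (mrgAux b k ns).reverse ++ tailRev := by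
  intro ns
  induction ns with
  | nil => intro b k tailRev; simp [mrgAux]
  | cons s rest IH =>
    intro b k tailRev
    obtain ⟨c, m⟩ := s
    by_cases hc : c = b
    · subst hc
      simp only [List.foldl_cons, stepN, if_true, mrgAux, IH]
    · have hbc : ¬(b = c) := fun h => hc h.symm
      simp only [List.foldl_cons, stepN, if_neg hbc, mrgAux, if_neg hc, IH,
        List.reverse_cons, List.append_assoc, List.cons_append, List.nil_append]

theorem foldl_stepN_top (ns : List (Bool × Nat)) :
    ns.foldl stepN [] = (mrgTop ns).reverse := by
  cases ns with
  | nil => rfl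
  | cons s rest =>
    obtain ⟨b, k⟩ := s
    simp only [List.foldl_cons, stepN, mrgTop]
    simpa using foldl_stepN_mrgAux rest b k []

theorem fold_merge (sl : List (Int × Int × Int)) (thr tgt lw rw : Int) :
    ∀ (l : List ((Int × Int × Int) × Nat)) (rn : List (Bool × Nat)),
    l.foldl (mergeStep sl thr tgt lw rw) (rn.map convRun) =
      ((normSegs (l.map (fun p =>
        ((if smoothCond sl thr tgt lw rw p.2 p.1 then tgt else p.1.1), p.1.2.1)))).foldl stepN rn).map convRun := by
  intro l
  induction l with
  | nil => intro rn; simp [normSegs]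
  | cons p rest IH =>
    intro rn
    set num := if smoothCond sl thr tgt lw rw p.2 p.1 then tgt else p.1.1 with hnum
    rw [List.map_cons, normSegs_cons]
    by_cases hlen : p.1.2.1 ≤ 0
    · simp only [List.foldl_cons, mergeStep, ← hnum, if_pos hlen]
      exact IH rn
    · have hconv : (if num < 1 then (0 : Int) else 1) = (if clsB num then (0 : Int) else 1) := by
        simp [clsB]
      have htn : ((p.1.2.1.toNat : Nat) : Int) = p.1.2.1 := by omega
      simp only [if_neg hlen]
      cases rn with
      | nil =>
        simp only [List.map_nil, List.foldl_cons, mergeStep, ← hnum, if_neg hlen]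
        have heq : [((if num < 1 then (0 : Int) else 1), p.1.2.1)] =
            ([(clsB num, p.1.2.1.toNat)] : List (Bool × Nat)).map convRun := by
          simp [convRun, hconv, htn]
        rw [heq, IH [(clsB num, p.1.2.1.toNat)]]
        rfl
      | cons r rn' =>
        obtain ⟨c', m⟩ := r
        simp only [List.map_cons, List.foldl_cons, mergeStep, ← hnum, if_neg hlen, convRun]
        by_cases hc : c' = clsB num
        · have hb : (((if c' then (0 : Int) else 1) == if num < 1 then (0 : Int) else 1)) = true := by
            rw [hconv, hc]; simp
          simp only [hb, if_true]
          have heq : ((if c' then (0 : Int) else 1, (m : Int) + p.1.2.1) :: rn'.map convRun) =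
              (((c', m + p.1.2.1.toNat) :: rn') : List (Bool × Nat)).map convRun := by
            simp only [List.map_cons, convRun]
            congr 2
            omega
          rw [heq, IH ((c', m + p.1.2.1.toNat) :: rn')]
          simp only [stepN, if_pos hc]
        · have hb : (((if c' then (0 : Int) else 1) == if num < 1 then (0 : Int) else 1)) = false := by
            rw [hconv]
            cases c' <;> cases h : clsB num <;> simp_all
          simp only [hb, if_false, Bool.false_eq_true]
          have heq : ((if num < 1 then (0 : Int) else 1, p.1.2.1) :: (if c' then (0 : Int) else 1, (m : Int)) :: rn'.map convRun) =
              (((clsB num, p.1.2.1.toNat) :: (c', m) :: rn') : List (Bool × Nat)).map convRun := by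
            simp [convRun, hconv, htn]
          rw [heq, IH ((clsB num, p.1.2.1.toNat) :: (c', m) :: rn')]
          simp only [stepN, if_neg hc]
  
theorem cum_decFrom : ∀ (ns : List (Bool × Nat)) (acc : List (Int × Int × Int)) (pos : Int),
    ((ns.map convRun).foldl (fun (a : List (Int × Int × Int) × Int) r =>
        (a.1 ++ [(r.1, r.2, a.2 + r.2 - 1)], a.2 + r.2)) (acc, pos)).1
      = acc ++ decFrom pos ns := by
  intro ns
  induction ns with
  | nil => intro acc pos; simp [decFrom]
  | cons s rest IH =>
    intro acc pos
    obtain ⟨b, k⟩ := s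
    simp only [List.map_cons, List.foldl_cons, convRun, IH, decFrom]
    simp [List.append_assoc]

theorem runsTop_eq_runsB (thr : Int) (data : List Int) :
    runsTop thr data = runsB (data.map (fun v => decide (v < thr))) := by
  cases data <;> simp [runsTop, runsB]

theorem switchlist_smoother_py_spec : Claim_equal_switchlist_smoother_py := by
  unfold Claim_equal_switchlist_smoother_py
  intro sl thr tgt lw rw _ hpre
  unfold Spec_switchlist_smoother_py
  set ps : List (Int × Int) := sl.zipIdx.map (fun p =>
    ((if smoothCond sl thr tgt lw rw p.2 p.1 then tgt else p.1.1), p.1.2.1)) with hps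
  -- facts from Pre_: some segment length is ≥ 1
  obtain ⟨u, hu, hul⟩ := hpre
  obtain ⟨i, hi, rfl⟩ := List.mem_iff_getElem.mp hu
  have hips : i < ps.length := by simp [hps, List.length_zipIdx]; omega
  have hqi : ps[i].2 = sl[i].2.1 := by simp [hps, List.getElem_zipIdx]
  have hmem : ∃ q ∈ ps, 1 ≤ q.2 := ⟨ps[i], List.getElem_mem _, by rw [hqi]; exact hul⟩
  have hall : ∀ s ∈ normSegs ps, 1 ≤ s.2 := by
    intro s hs
    obtain ⟨q, hq', hfq⟩ := List.mem_filterMap.mp hs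
    by_cases h : q.2 ≤ 0
    · simp [h] at hfq
    · simp only [if_neg h, Option.some.injEq] at hfq
      rw [← hfq]
      omega
  have hns : normSegs ps ≠ [] := by
    intro hnil
    obtain ⟨q, hq', hq1⟩ := hmem
    have := List.filterMap_eq_nil_iff.mp hnil q hq'
    by_cases h : q.2 ≤ 0
    · omega
    · simp [h] at this
  -- the expanded characteristic list (A's constr_list) and its class structure
  have hA : constructListFromSwitchlist (sl.mapIdx (fun idx u =>
      if smoothCond sl thr tgt lw rw idx u then (tgt, u.2.1, u.2.2) else u))
      = ps.flatMap (fun q => List.replicate q.2.toNat q.1) := by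
    unfold constructListFromSwitchlist
    rw [PySem.List.foldl_append_eq_flatMap, List.nil_append, List.mapIdx_eq_zipIdx_map,
      List.flatMap_map, hps, List.flatMap_map]
    congr 1
    funext p
    by_cases h : smoothCond sl thr tgt lw rw p.2 p.1 <;> simp [h]
  have hcls : (ps.flatMap (fun q => List.replicate q.2.toNat q.1)).map clsB
      = expandB (normSegs ps) := map_cls_flatMap ps
  have hdne : ps.flatMap (fun q => List.replicate q.2.toNat q.1) ≠ [] := by
    intro h0
    have hexp : expandB (normSegs ps) = [] := by rw [← hcls, h0]; rfl
    cases hcase : normSegs ps with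
    | nil => exact hns hcase
    | cons s rest =>
      obtain ⟨b, k⟩ := s
      have hk : 1 ≤ k := hall (b, k) (by rw [hcase]; simp)
      rw [hcase, expandB_cons] at hexp
      simp [List.append_eq_nil_iff, List.replicate_eq_nil_iff] at hexp
      omega
  -- A's value
  have hAval : switchlist_smoother_py sl thr tgt lw rw = decFrom 0 (mrgTop (normSegs ps)) := by
    show getSwitchlist (constructListFromSwitchlist _) 1 = _
    rw [hA, getSwitchlist_eq_runsTop _ 1 hdne, runsTop_eq_runsB]
    show runsB ((ps.flatMap (fun q => List.replicate q.2.toNat q.1)).map clsB) = _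
    rw [hcls, runsB_expandB _ hall]
  -- B's value
  have hrev : sl.zipIdx.foldl (mergeStep sl thr tgt lw rw) []
      = ((mrgTop (normSegs ps)).reverse).map convRun := by
    have h := fold_merge sl thr tgt lw rw sl.zipIdx []
    simp only [List.map_nil] at h
    rw [h, ← hps, foldl_stepN_top]
  have hBval : switchlist_smoother_py_alt sl thr tgt lw rw = decFrom 0 (mrgTop (normSegs ps)) := by
    show ((sl.zipIdx.foldl (mergeStep sl thr tgt lw rw) []).reverse.foldl
      (fun (acc : List (Int × Int × Int) × Int) r =>
        (acc.1 ++ [(r.1, r.2, acc.2 + r.2 - 1)], acc.2 + r.2)) ([], 0)).1 = _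
    rw [hrev, ← List.map_reverse, List.reverse_reverse]
    exact cum_decFrom (mrgTop (normSegs ps)) [] 0
  rw [hAval, hBval]

@[simp]
theorem switchlist_smoother_py_raises : Claim_raises_switchlist_smoother_py := by
  unfold Claim_raises_switchlist_smoother_py
  constructor
  · intro sl thr tgt lw rw _ hr hpre
    obtain ⟨u, hu, h1⟩ := hpre
    have := hr u hu
    omega
  · exact ⟨by decide, by decide, by decide⟩
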